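-- pv_equiv track=rewrite | github.com/ARNAVVGUPTAA/MAPF-SNN | data_generation/record.py | replan_with_astar
-- ===== SOURCE A (Python) =====
-- from collections import deque
--
-- def replan_with_astar(start_pos, goal_pos, board_size, obstacles):
--     """
--     Lightweight BFS replan — no CBS overhead, no constraint tables.
--     Returns the first action of the shortest path from start to goal.
--     """
--     if start_pos == goal_pos:
--         return [4]  # already there, STAY
--
--     obs_set = set(obstacles)
--     W, H = board_size
--     MOVES = [(1, 0, 0), (0, 1, 1), (-1, 0, 2), (0, -1, 3)]  # dx,dy,action
--
--     queue = deque([(start_pos, [])])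
--     visited = {start_pos}
--
--     while queue:
--         pos, path = queue.popleft()
--         for dx, dy, act in MOVES:
--             npos = (pos[0] + dx, pos[1] + dy)
--             if npos in visited:
--                 continue
--             if not (0 <= npos[0] < W and 0 <= npos[1] < H):
--                 continue
--             if npos in obs_set:
--                 continue
--             new_path = path + [act]
--             if npos == goal_pos:
--                 return new_path
--             visited.add(npos)
--             queue.append((npos, new_path))
--
--     return None  # no path found
-- ===== SOURCE B (Python) =====
-- def replan_with_astar(start_pos, goal_pos, board_size, obstacles):
--     """Level-synchronous BFS: expand whole frontiers at once, record one
--     (predecessor, action) link per cell, rebuild the path once by walking the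
--     links back from the goal instead of copying an action list into every queue entry."""
--     if start_pos == goal_pos:
--         return [4]  # already there, STAY
--
--     W, H = board_size
--     blocked = set(obstacles)
--
--     parent = {start_pos: None}
--     frontier = [start_pos]
--     while frontier:
--         nxt = []
--         for x, y in frontier:
--             for npos, act in (((x + 1, y), 0), ((x, y + 1), 1),
--                               ((x - 1, y), 2), ((x, y - 1), 3)):
--                 if npos in parent or npos in blocked or \
--                         not (0 <= npos[0] < W and 0 <= npos[1] < H):
--                     continue
--                 parent[npos] = ((x, y), act)
--                 if npos == goal_pos:
--                     path, cur = [], npos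
--                     while parent[cur] is not None:
--                         prev, act = parent[cur]
--                         path = [act] + path
--                         cur = prev
--                     return path
--                 nxt.append(npos)
--         frontier = nxt
--     return None  # no path found
-- ===== Notes on version B (the rewrite author's own statement) =====
-- stated objective: alternative
-- what changed: B replaces A's FIFO queue of (cell, copied action list) entries by a level-synchronous BFS over whole frontiers that records one (predecessor, action) link per cell and rebuilds the path once by walking the links back from the goal.
import Mathlib
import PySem

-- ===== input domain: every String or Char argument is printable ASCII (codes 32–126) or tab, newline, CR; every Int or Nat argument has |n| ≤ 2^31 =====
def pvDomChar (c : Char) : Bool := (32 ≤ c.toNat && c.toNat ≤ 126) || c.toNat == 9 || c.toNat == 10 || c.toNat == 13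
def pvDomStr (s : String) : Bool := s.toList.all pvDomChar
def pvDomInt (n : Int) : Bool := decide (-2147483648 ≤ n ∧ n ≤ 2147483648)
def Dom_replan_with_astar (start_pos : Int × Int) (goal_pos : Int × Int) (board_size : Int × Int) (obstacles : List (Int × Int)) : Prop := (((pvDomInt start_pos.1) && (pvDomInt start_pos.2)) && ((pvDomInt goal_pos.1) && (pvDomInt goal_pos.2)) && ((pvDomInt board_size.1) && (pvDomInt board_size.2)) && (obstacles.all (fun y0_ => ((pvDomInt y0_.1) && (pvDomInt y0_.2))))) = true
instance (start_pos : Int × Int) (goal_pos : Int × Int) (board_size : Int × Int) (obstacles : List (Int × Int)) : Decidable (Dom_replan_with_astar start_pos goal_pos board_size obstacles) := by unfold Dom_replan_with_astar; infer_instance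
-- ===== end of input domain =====

-- B replaces A's FIFO queue of (cell, copied action list) entries by a level-synchronous BFS
-- with one (predecessor, action) link per cell and a single walk back from the goal.

-- ===== PORT A =====
-- A's MOVES table (dx, dy, action)
def pvMoves : List (Int × Int × Int) := [(1, 0, 0), (0, 1, 1), (-1, 0, 2), (0, -1, 3)]

-- the body of A's 'for dx, dy, act in MOVES' loop (early return = Sum.inr)
def pvInnerA (W H : Int) (goal : Int × Int) (obs : PySem.Set (Int × Int))
    (pos : Int × Int) (path : List Int) :
    List (Int × Int × Int) → List ((Int × Int) × List Int) → PySem.Set (Int × Int) →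
    Sum (List ((Int × Int) × List Int) × PySem.Set (Int × Int)) (List Int)
  | [], q, v => Sum.inl (q, v)
  | (dx, dy, act) :: ms, q, v =>
    let np : Int × Int := (pos.1 + dx, pos.2 + dy)
    if np ∈ v then
      pvInnerA W H goal obs pos path ms q v
    else if ¬ (0 ≤ np.1 ∧ np.1 < W ∧ 0 ≤ np.2 ∧ np.2 < H) then
      pvInnerA W H goal obs pos path ms q v
    else if np ∈ obs then
      pvInnerA W H goal obs pos path ms q v
    else
      if np = goal then Sum.inr (path ++ [act])
      else pvInnerA W H goal obs pos path ms (q ++ [(np, path ++ [act])]) (PySem.Set.add v np)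

-- A's 'while queue' loop; fuel bounds the number of pops (≤ 1 + pushes ≤ W*H + 1)
def pvLoopA (W H : Int) (goal : Int × Int) (obs : PySem.Set (Int × Int)) :
    Nat → List ((Int × Int) × List Int) → PySem.Set (Int × Int) → Option (List Int)
  | 0, _, _ => none
  | _ + 1, [], _ => none
  | fuel + 1, (pos, path) :: rest, v =>
    match pvInnerA W H goal obs pos path pvMoves rest v with
    | Sum.inr ans => some ans
    | Sum.inl (q', v') => pvLoopA W H goal obs fuel q' v'

def replan_with_astar (start_pos : Int × Int) (goal_pos : Int × Int) (board_size : Int × Int) (obstacles : List (Int × Int)) : Option (List Int) :=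
  if start_pos = goal_pos then some [4]
  else
    pvLoopA board_size.1 board_size.2 goal_pos (PySem.Set.ofList obstacles)
      (board_size.1.toNat * board_size.2.toNat + 1)
      [(start_pos, [])] (PySem.Set.ofList [start_pos])

-- ===== PORT B =====
-- the parent map: cell ↦ none (root) or some (predecessor, action)
abbrev pvPar := PySem.Dict (Int × Int) (Option ((Int × Int) × Int))

-- B's literal neighbour tuple for a frontier cell (x, y)
def pvNbrs (x y : Int) : List ((Int × Int) × Int) :=
  [((x + 1, y), 0), ((x, y + 1), 1), ((x - 1, y), 2), ((x, y - 1), 3)]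

-- B's 'while parent[cur] is not None' walk: prepend each action ('path = [act] + path');
-- fuel (the size of the parent map) bounds the link-chain length
def pvBuild : Nat → pvPar → (Int × Int) → List Int → List Int
  | 0, _, _, path => path
  | n + 1, par, cur, path =>
    match par.get? cur with
    | some (some (prev, act)) => pvBuild n par prev (act :: path)
    | _ => path

-- B's inner 'for npos, act in …' loop over one cell's neighbours
def pvCellB (W H : Int) (goal : Int × Int) (obs : PySem.Set (Int × Int)) (pos : Int × Int) :
    List ((Int × Int) × Int) → List (Int × Int) → pvPar →
    Sum (List (Int × Int) × pvPar) (List Int)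
  | [], nxt, par => Sum.inl (nxt, par)
  | (np, act) :: rest, nxt, par =>
    if (par.get? np).isSome ∨ np ∈ obs ∨ ¬ (0 ≤ np.1 ∧ np.1 < W ∧ 0 ≤ np.2 ∧ np.2 < H) then
      pvCellB W H goal obs pos rest nxt par
    else
      let par' := par.insert np (some (pos, act))
      if np = goal then Sum.inr (pvBuild par'.size par' np [])
      else pvCellB W H goal obs pos rest (nxt ++ [np]) par'

-- B's 'for x, y in frontier' loop
def pvFrontierB (W H : Int) (goal : Int × Int) (obs : PySem.Set (Int × Int)) :
    List (Int × Int) → List (Int × Int) → pvPar →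
    Sum (List (Int × Int) × pvPar) (List Int)
  | [], nxt, par => Sum.inl (nxt, par)
  | pos :: f, nxt, par =>
    match pvCellB W H goal obs pos (pvNbrs pos.1 pos.2) nxt par with
    | Sum.inr ans => Sum.inr ans
    | Sum.inl (nxt', par') => pvFrontierB W H goal obs f nxt' par'

-- B's 'while frontier' loop; fuel bounds the number of levels (≤ discoveries + 1 ≤ W*H + 1)
def pvLevelsB (W H : Int) (goal : Int × Int) (obs : PySem.Set (Int × Int)) :
    Nat → List (Int × Int) → pvPar → Option (List Int)
  | 0, _, _ => none
  | _ + 1, [], _ => none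
  | fuel + 1, f, par =>
    match pvFrontierB W H goal obs f [] par with
    | Sum.inr ans => some ans
    | Sum.inl (nxt, par') => pvLevelsB W H goal obs fuel nxt par'

def replan_with_astar_alt (start_pos : Int × Int) (goal_pos : Int × Int) (board_size : Int × Int) (obstacles : List (Int × Int)) : Option (List Int) :=
  if start_pos = goal_pos then some [4]
  else
    pvLevelsB board_size.1 board_size.2 goal_pos (PySem.Set.ofList obstacles)
      (board_size.1.toNat * board_size.2.toNat + 1)
      [start_pos] (PySem.Dict.empty.insert start_pos none)

-- ===== PRECONDITION & SPEC =====
def Spec_replan_with_astar (start_pos : Int × Int) (goal_pos : Int × Int) (board_size : Int × Int) (obstacles : List (Int × Int)) (out : Option (List Int)) : Prop := out = replan_with_astar_alt start_pos goal_pos board_size obstacles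
instance (start_pos : Int × Int) (goal_pos : Int × Int) (board_size : Int × Int) (obstacles : List (Int × Int)) (out : Option (List Int)) : Decidable (Spec_replan_with_astar start_pos goal_pos board_size obstacles out) := by unfold Spec_replan_with_astar; infer_instance

-- ===== CLAIM (what is proved, stated in full; the proofs are below) =====
def Claim_equal_replan_with_astar : Prop := ∀ (start_pos : Int × Int) (goal_pos : Int × Int) (board_size : Int × Int) (obstacles : List (Int × Int)), Dom_replan_with_astar start_pos goal_pos board_size obstacles → Spec_replan_with_astar start_pos goal_pos board_size obstacles (replan_with_astar start_pos goal_pos board_size obstacles)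

-- ===== LEMMAS AND PROOFS =====

-- the in-bounds cells, and the count of in-bounds cells not yet visited
noncomputable def pvBd (W H : Int) : Finset (Int × Int) := Finset.Icc 0 (W - 1) ×ˢ Finset.Icc 0 (H - 1)

noncomputable def pvC (W H : Int) (v : PySem.Set (Int × Int)) : Nat := ((pvBd W H) \ v.toFinset).card

theorem mem_pvBd (W H : Int) (p : Int × Int) :
    p ∈ pvBd W H ↔ (0 ≤ p.1 ∧ p.1 < W ∧ 0 ≤ p.2 ∧ p.2 < H) := by
  simp [pvBd, Finset.mem_product, Finset.mem_Icc]
  omega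

theorem pvC_add (W H : Int) (v : PySem.Set (Int × Int)) (np : Int × Int)
    (hb : np ∈ pvBd W H) (hnv : np ∉ v) :
    pvC W H (PySem.Set.add v np) + 1 = pvC W H v := by
  have hadd : PySem.Set.add v np = v ++ [np] := by
    simp [PySem.Set.add, PySem.Set.contains]
    intro h
    exact absurd h hnv
  rw [pvC, pvC, hadd]
  have : (pvBd W H) \ (v ++ [np]).toFinset = ((pvBd W H) \ v.toFinset).erase np := by
    ext x
    simp [Finset.mem_erase, Finset.mem_sdiff, List.mem_toFinset]
    tauto
  rw [this, Finset.card_erase_of_mem (by simp [Finset.mem_sdiff, List.mem_toFinset]; exact ⟨hb, hnv⟩)]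
  have hpos : 0 < ((pvBd W H) \ v.toFinset).card :=
    Finset.card_pos.mpr ⟨np, by simp [Finset.mem_sdiff, List.mem_toFinset]; exact ⟨hb, hnv⟩⟩
  omega

-- 'path is the action sequence the parent map records from the root to q'
inductive pvChain (par : pvPar) : (Int × Int) → List Int → Prop
  | root (p : Int × Int) (h : par.get? p = some none) : pvChain par p []
  | step (p q : Int × Int) (a : Int) (path : List Int) (hc : pvChain par p path)
      (h : par.get? q = some (some (p, a))) : pvChain par q (path ++ [a])

theorem pvChain_insert_fresh {par : pvPar} {p : Int × Int} {path : List Int}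
    (hc : pvChain par p path) {k : Int × Int} (hk : par.get? k = none)
    (v : Option ((Int × Int) × Int)) : pvChain (par.insert k v) p path := by
  induction hc with
  | root q h =>
    exact pvChain.root q (by rw [PySem.Dict.get?_insert_of_ne par v (by rintro rfl; rw [h] at hk; cases hk)]; exact h)
  | step p q a path hc h ih =>
    exact pvChain.step p q a path ih (by rw [PySem.Dict.get?_insert_of_ne par v (by rintro rfl; rw [h] at hk; cases hk)]; exact h)

theorem pvBuild_chain {par : pvPar} {q : Int × Int} {path : List Int}
    (hc : pvChain par q path) : ∀ (fuel : Nat) (acc : List Int), path.length ≤ fuel →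
    pvBuild fuel par q acc = path ++ acc := by
  induction hc with
  | root p h =>
    intro fuel acc _
    cases fuel with
    | zero => simp [pvBuild]
    | succ n => simp [pvBuild, h]
  | step p q a path hc h ih =>
    intro fuel acc hf
    cases fuel with
    | zero => simp at hf
    | succ n =>
      have : path.length ≤ n := by simp at hf; omega
      simp only [pvBuild, h]
      rw [ih n (a :: acc) this]
      simp

-- the inner-step relation: A's per-cell move loop vs B's per-cell neighbour loop
def pvRel (W H : Int) (qA1 : List ((Int × Int) × List Int)) (c0 : Nat)
    (ra : Sum (List ((Int × Int) × List Int) × PySem.Set (Int × Int)) (List Int))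
    (rb : Sum (List (Int × Int) × pvPar) (List Int)) : Prop :=
  match ra, rb with
  | Sum.inr a, Sum.inr b => a = b
  | Sum.inl (qA', v'), Sum.inl (nxt', par') =>
      ∃ qA2', qA' = qA1 ++ qA2' ∧ qA2'.map Prod.fst = nxt' ∧
        (∀ x : Int × Int, x ∈ v' ↔ (par'.get? x).isSome) ∧
        (∀ pr ∈ qA', pvChain par' pr.1 pr.2 ∧ pr.2.length + 1 ≤ par'.size) ∧
        qA2'.length + pvC W H v' = c0
  | _, _ => False

theorem pvCell_rel (W H : Int) (goal : Int × Int) (obs : PySem.Set (Int × Int))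
    (pos : Int × Int) (path : List Int) :
    ∀ (ms : List (Int × Int × Int)) (qA1 qA2 : List ((Int × Int) × List Int))
      (v : PySem.Set (Int × Int)) (par : pvPar),
      (∀ x : Int × Int, x ∈ v ↔ (par.get? x).isSome) →
      pvChain par pos path → path.length + 1 ≤ par.size →
      (∀ pr ∈ qA1 ++ qA2, pvChain par pr.1 pr.2 ∧ pr.2.length + 1 ≤ par.size) →
      pvRel W H qA1 (qA2.length + pvC W H v)
        (pvInnerA W H goal obs pos path ms (qA1 ++ qA2) v)
        (pvCellB W H goal obs pos (ms.map (fun m => ((pos.1 + m.1, pos.2 + m.2.1), m.2.2))) (qA2.map Prod.fst) par) := by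
  intro ms
  induction ms with
  | nil =>
    intro qA1 qA2 v par hv _ _ hqc
    exact ⟨qA2, rfl, rfl, hv, hqc, rfl⟩
  | cons m ms ih =>
    intro qA1 qA2 v par hv hpos hlen hqc
    obtain ⟨dx, dy, act⟩ := m
    simp only [pvInnerA, pvCellB, List.map_cons]
    set np : Int × Int := (pos.1 + dx, pos.2 + dy) with hnp
    have hmem : (np ∈ v) ↔ ((par.get? np).isSome = true) := hv np
    by_cases h1 : np ∈ v
    · rw [if_pos h1, if_pos (Or.inl (hmem.mp h1))]
      exact ih qA1 qA2 v par hv hpos hlen hqc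
    · rw [if_neg h1]
      have hfresh : par.get? np = none := by
        cases hg : par.get? np with
        | none => rfl
        | some w => exact absurd (hmem.mpr (by simp [hg])) h1
      by_cases h2 : ¬ (0 ≤ np.1 ∧ np.1 < W ∧ 0 ≤ np.2 ∧ np.2 < H)
      · rw [if_pos h2, if_pos (Or.inr (Or.inr h2))]
        exact ih qA1 qA2 v par hv hpos hlen hqc
      · rw [if_neg h2]
        by_cases h3 : np ∈ obs
        · rw [if_pos h3, if_pos (Or.inr (Or.inl h3))]
          exact ih qA1 qA2 v par hv hpos hlen hqc
        · have hbounds : 0 ≤ np.1 ∧ np.1 < W ∧ 0 ≤ np.2 ∧ np.2 < H := not_not.mp h2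
          have hnskip : ¬ ((par.get? np).isSome = true ∨ np ∈ obs ∨ ¬ (0 ≤ np.1 ∧ np.1 < W ∧ 0 ≤ np.2 ∧ np.2 < H)) := by
            rintro (hs | hs | hs)
            · simp [hfresh] at hs
            · exact h3 hs
            · exact hs hbounds
          rw [if_neg h3, if_neg hnskip]
          have hnc : par.contains np = false := by
            rw [PySem.Dict.contains_eq_isSome_get?, hfresh]; rfl
          have hsize : (par.insert np (some (pos, act))).size = par.size + 1 := by
            rw [PySem.Dict.size_insert, hnc]; simp
          have hchain' : pvChain (par.insert np (some (pos, act))) np (path ++ [act]) :=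
            pvChain.step pos np act path (pvChain_insert_fresh hpos hfresh _)
              (PySem.Dict.get?_insert_self par np (some (pos, act)))
          by_cases h4 : np = goal
          · rw [if_pos h4, if_pos h4]
            show path ++ [act] = _
            rw [pvBuild_chain hchain' _ [] (by
              have h6 : ((par.insert (pos.1 + dx, pos.2 + dy) (some (pos, act))).size) = par.size + 1 := hsize
              simp only [h6, List.length_append, List.length_cons, List.length_nil]
              omega)]
            simp
          · rw [if_neg h4, if_neg h4]
            have hv' : ∀ x : Int × Int, x ∈ PySem.Set.add v np ↔ ((par.insert np (some (pos, act))).get? x).isSome := by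
              intro x
              rw [PySem.Set.mem_add]
              constructor
              · rintro (hx | rfl)
                · cases hgx : par.get? x with
                  | none => exact absurd ((hv x).mp hx) (by simp [hgx])
                  | some w =>
                    rw [PySem.Dict.get?_insert_of_ne par (some (pos, act)) (by rintro rfl; rw [hgx] at hfresh; cases hfresh), hgx]; rfl
                · rw [PySem.Dict.get?_insert_self]; rfl
              · intro hs
                by_cases hxe : x = np
                · right; exact hxe
                · left
                  rw [PySem.Dict.get?_insert_of_ne par (some (pos, act)) hxe] at hs
                  exact (hv x).mpr hs
            have hqc' : ∀ pr ∈ (qA1 ++ qA2) ++ [(np, path ++ [act])],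
                pvChain (par.insert np (some (pos, act))) pr.1 pr.2 ∧ pr.2.length + 1 ≤ (par.insert np (some (pos, act))).size := by
              intro pr hpr
              rw [List.mem_append] at hpr
              rcases hpr with hpr | hpr
              · obtain ⟨hc, hl⟩ := hqc pr hpr
                exact ⟨pvChain_insert_fresh hc hfresh _, by omega⟩
              · simp at hpr
                subst hpr
                exact ⟨hchain', by simp only [List.length_append, List.length_cons, List.length_nil, hsize]; omega⟩
            have happ : (qA1 ++ qA2) ++ [(np, path ++ [act])] = qA1 ++ (qA2 ++ [(np, path ++ [act])]) := by
              simp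
            have hC : (qA2 ++ [(np, path ++ [act])]).length + pvC W H (PySem.Set.add v np) = qA2.length + pvC W H v := by
              have := pvC_add W H v np ((mem_pvBd W H np).mpr hbounds) h1
              simp only [List.length_append, List.length_cons, List.length_nil]
              omega
            rw [← hC, happ]
            have := ih qA1 (qA2 ++ [(np, path ++ [act])]) (PySem.Set.add v np) (par.insert np (some (pos, act)))
              hv' (pvChain_insert_fresh hpos hfresh _) (by omega) (by rw [← happ]; exact hqc')
            simpa using this

theorem pvLoopA_nil (W H : Int) (goal : Int × Int) (obs : PySem.Set (Int × Int))
    (fa : Nat) (v : PySem.Set (Int × Int)) : pvLoopA W H goal obs fa [] v = none := by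
  cases fa <;> rfl

theorem pvNbrs_eq_map (pos : Int × Int) :
    pvMoves.map (fun m => ((pos.1 + m.1, pos.2 + m.2.1), m.2.2)) = pvNbrs pos.1 pos.2 := by
  simp [pvMoves, pvNbrs]
  exact ⟨by ring, by ring⟩

theorem pvFrontier_run (W H : Int) (goal : Int × Int) (obs : PySem.Set (Int × Int)) :
    ∀ (qA1 qA2 : List ((Int × Int) × List Int)) (v : PySem.Set (Int × Int)) (par : pvPar) (fa : Nat),
      (∀ x : Int × Int, x ∈ v ↔ (par.get? x).isSome) →
      (∀ pr ∈ qA1 ++ qA2, pvChain par pr.1 pr.2 ∧ pr.2.length + 1 ≤ par.size) →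
      qA1.length + qA2.length + pvC W H v ≤ fa →
      (∀ ans, pvFrontierB W H goal obs (qA1.map Prod.fst) (qA2.map Prod.fst) par = Sum.inr ans →
        pvLoopA W H goal obs fa (qA1 ++ qA2) v = some ans) ∧
      (∀ nxt' par', pvFrontierB W H goal obs (qA1.map Prod.fst) (qA2.map Prod.fst) par = Sum.inl (nxt', par') →
        ∃ qA2' v', pvLoopA W H goal obs fa (qA1 ++ qA2) v = pvLoopA W H goal obs (fa - qA1.length) qA2' v' ∧
          qA2'.map Prod.fst = nxt' ∧
          (∀ x : Int × Int, x ∈ v' ↔ (par'.get? x).isSome) ∧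
          (∀ pr ∈ qA2', pvChain par' pr.1 pr.2 ∧ pr.2.length + 1 ≤ par'.size) ∧
          qA2'.length + pvC W H v' = qA2.length + pvC W H v) := by
  intro qA1
  induction qA1 with
  | nil =>
    intro qA2 v par fa hv hqc hfa
    constructor
    · intro ans hB
      simp only [List.map_nil, pvFrontierB] at hB
      simp at hB
    · intro nxt' par' hB
      simp only [List.map_nil, pvFrontierB] at hB
      cases hB
      exact ⟨qA2, v, rfl, rfl, hv, fun pr hpr => hqc pr (by simpa using hpr), rfl⟩
  | cons hd rest ih =>
    intro qA2 v par fa hv hqc hfa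
    obtain ⟨pos, path⟩ := hd
    cases fa with
    | zero => simp at hfa
    | succ n =>
      have hrel := pvCell_rel W H goal obs pos path pvMoves rest qA2 v par hv
        (hqc (pos, path) (by simp)).1 (hqc (pos, path) (by simp)).2
        (fun pr hpr => hqc pr (by simp at hpr ⊢; tauto))
      rw [pvNbrs_eq_map pos] at hrel
      cases hA : pvInnerA W H goal obs pos path pvMoves (rest ++ qA2) v with
      | inr ansA =>
        cases hB : pvCellB W H goal obs pos (pvNbrs pos.1 pos.2) (qA2.map Prod.fst) par with
        | inr ansB =>
          rw [hA, hB] at hrel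
          simp only [pvRel] at hrel
          subst hrel
          constructor
          · intro ans hfr
            simp only [List.map_cons, pvFrontierB, hB] at hfr
            cases hfr
            simp only [List.cons_append, pvLoopA, hA]
          · intro nxt' par' hfr
            simp only [List.map_cons, pvFrontierB, hB] at hfr
            simp at hfr
        | inl sB =>
          obtain ⟨nxt1, par1⟩ := sB
          rw [hA, hB] at hrel
          simp only [pvRel] at hrel
      | inl sA =>
        obtain ⟨q1, v1⟩ := sA
        cases hB : pvCellB W H goal obs pos (pvNbrs pos.1 pos.2) (qA2.map Prod.fst) par with
        | inr ansB =>
          rw [hA, hB] at hrel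
          simp only [pvRel] at hrel
        | inl sB =>
          obtain ⟨nxt1, par1⟩ := sB
          rw [hA, hB] at hrel
          obtain ⟨qA2mid, hq1, hmap1, hv1, hqc1, hsum1⟩ := hrel
          subst hq1
          have hbound : rest.length + qA2mid.length + pvC W H v1 ≤ n := by
            have : qA2mid.length + pvC W H v1 = qA2.length + pvC W H v := hsum1
            simp only [List.length_cons] at hfa
            omega
          have hih := ih qA2mid v1 par1 n hv1 hqc1 hbound
          constructor
          · intro ans hfr
            simp only [List.map_cons, pvFrontierB, hB] at hfr
            simp only [List.cons_append, pvLoopA, hA]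
            exact hih.1 ans (by rw [← hmap1] at hfr; exact hfr)
          · intro nxt' par' hfr
            simp only [List.map_cons, pvFrontierB, hB] at hfr
            obtain ⟨qA2f, vf, heq, hmapf, hvf, hqcf, hsumf⟩ :=
              hih.2 nxt' par' (by rw [← hmap1] at hfr; exact hfr)
            refine ⟨qA2f, vf, ?_, hmapf, hvf, hqcf, by omega⟩
            simp only [List.cons_append, pvLoopA, hA]
            rw [heq]
            congr 1
            simp only [List.length_cons]
            omega

theorem pvLevels_rel (W H : Int) (goal : Int × Int) (obs : PySem.Set (Int × Int)) :
    ∀ (fb : Nat) (qA : List ((Int × Int) × List Int)) (v : PySem.Set (Int × Int)) (par : pvPar) (fa : Nat),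
      (∀ x : Int × Int, x ∈ v ↔ (par.get? x).isSome) →
      (∀ pr ∈ qA, pvChain par pr.1 pr.2 ∧ pr.2.length + 1 ≤ par.size) →
      qA.length + pvC W H v ≤ fa →
      (qA = [] ∨ 1 + pvC W H v ≤ fb) →
      pvLoopA W H goal obs fa qA v = pvLevelsB W H goal obs fb (qA.map Prod.fst) par := by
  intro fb
  induction fb with
  | zero =>
    intro qA v par fa hv hqc hfa hfb
    rcases hfb with rfl | hfb
    · rw [pvLoopA_nil]; rfl
    · omega
  | succ m ih =>
    intro qA v par fa hv hqc hfa hfb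
    cases hqA : qA with
    | nil => rw [pvLoopA_nil]; rfl
    | cons hd tl =>
      subst hqA
      have hrun := pvFrontier_run W H goal obs (hd :: tl) [] v par fa hv
        (by simpa using hqc) (by simpa using hfa)
      cases hF : pvFrontierB W H goal obs ((hd :: tl).map Prod.fst) [] par with
      | inr ans =>
        simp only [List.map_cons] at hF
        simp only [List.map_cons, pvLevelsB, hF]
        simpa using hrun.1 ans (by simpa using hF)
      | inl s =>
        obtain ⟨nxt, par1⟩ := s
        simp only [List.map_cons] at hF
        simp only [List.map_cons, pvLevelsB, hF]
        obtain ⟨qA2f, vf, heq, hmapf, hvf, hqcf, hsumf⟩ := hrun.2 nxt par1 (by simpa using hF)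
        simp only [List.append_nil] at heq
        rw [heq]
        rw [← hmapf]
        apply ih qA2f vf par1 (fa - (hd :: tl).length) hvf hqcf
        · simp only [List.length_nil] at hsumf
          simp only [List.length_cons] at hfa ⊢
          omega
        · cases hq2 : qA2f with
          | nil => exact Or.inl rfl
          | cons a b =>
            right
            rcases hfb with h | h
            · cases h
            · subst hq2
              simp only [List.length_nil, List.length_cons] at hsumf
              omega

-- ===== VERDICT (by name: the statement is the Claim_ definition above) =====
theorem replan_with_astar_spec : Claim_equal_replan_with_astar := by
  intro start_pos goal_pos board_size obstacles _hdom
  unfold Spec_replan_with_astar replan_with_astar replan_with_astar_alt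
  by_cases h : start_pos = goal_pos
  · rw [if_pos h, if_pos h]
  · rw [if_neg h, if_neg h]
    have hcard : (pvBd board_size.1 board_size.2).card = board_size.1.toNat * board_size.2.toNat := by
      rw [pvBd, Finset.card_product, Int.card_Icc, Int.card_Icc]
      congr 1 <;> congr 1 <;> ring
    have hC : pvC board_size.1 board_size.2 (PySem.Set.ofList [start_pos]) ≤ board_size.1.toNat * board_size.2.toNat := by
      rw [pvC, ← hcard]
      exact Finset.card_le_card (Finset.sdiff_subset)
    apply pvLevels_rel
    · intro x
      have hof : PySem.Set.ofList [start_pos] = [start_pos] := rfl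
      rw [hof]
      constructor
      · intro hx
        rw [List.mem_singleton] at hx
        subst hx
        rw [PySem.Dict.get?_insert_self]; rfl
      · intro hs
        by_cases hxe : x = start_pos
        · simp [hxe]
        · rw [PySem.Dict.get?_insert_of_ne PySem.Dict.empty none hxe, PySem.Dict.get?_empty] at hs
          cases hs
    · intro pr hpr
      rw [List.mem_singleton] at hpr
      subst hpr
      refine ⟨pvChain.root start_pos (PySem.Dict.get?_insert_self _ _ _), ?_⟩
      simp [PySem.Dict.size_insert]
    · simp only [List.length_cons, List.length_nil]
      omega
    · right
      omega
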